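-- pv_equiv track=rewrite | github.com/JaraVictoria/SSL | Parser/automataConstante.py | automata_constante
-- ===== SOURCE A (Python) =====
-- ESTADO_FINAL = "ESTADO ACEPTADO"
--
-- ESTADO_NO_FINAL = "ESTADO NO ACEPTADO"
--
-- ESTADO_TRAMPA = "ESTADO TRAMPA"
--
-- def automata_constante(cadena):
-- 	estado = 0
-- 	estados_finales = [2]
--
-- 	for caracter in cadena:
-- 		if estado == 0 and caracter == "-":
-- 			estado = 1
-- 		elif estado == 0 and caracter.isnumeric():
-- 			estado = 2
-- 		elif estado == 1 and (caracter.isdigit() and int(caracter) in range(1,10)):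
-- 			estado = 2
-- 		elif estado == 2 and caracter.isnumeric():
-- 			estado = 2
-- 		else:
-- 			estado = -1
-- 			break
--
-- 	if estado == -1:
-- 		return ESTADO_TRAMPA
-- 	if estado in estados_finales:
-- 		return ESTADO_FINAL
-- 	else:
-- 		return ESTADO_NO_FINAL
-- ===== SOURCE B (Python) =====
-- ESTADO_FINAL = "ESTADO ACEPTADO"
-- ESTADO_NO_FINAL = "ESTADO NO ACEPTADO"
-- ESTADO_TRAMPA = "ESTADO TRAMPA"
--
-- def automata_constante(cadena):
--     # Structural decomposition instead of a DFA state variable.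
--     if cadena == "":
--         return ESTADO_NO_FINAL
--     if cadena[0] == "-":
--         resto = cadena[1:]
--         if resto == "":
--             return ESTADO_NO_FINAL
--         if not (resto[0].isdigit() and int(resto[0]) in range(1, 10)):
--             return ESTADO_TRAMPA
--         cuerpo = resto[1:]
--     elif cadena[0].isnumeric():
--         cuerpo = cadena[1:]
--     else:
--         return ESTADO_TRAMPA
--     return ESTADO_FINAL if all(c.isnumeric() for c in cuerpo) else ESTADO_TRAMPA
-- ===== Notes on version B (the rewrite author's own statement) =====
-- stated objective: simpler
-- what changed: Replaced the explicit DFA with a state variable by direct structural branching: handle the empty string and an optional leading minus sign, validate the first digit, then one validation loop over the remaining characters with all().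
import Mathlib
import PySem

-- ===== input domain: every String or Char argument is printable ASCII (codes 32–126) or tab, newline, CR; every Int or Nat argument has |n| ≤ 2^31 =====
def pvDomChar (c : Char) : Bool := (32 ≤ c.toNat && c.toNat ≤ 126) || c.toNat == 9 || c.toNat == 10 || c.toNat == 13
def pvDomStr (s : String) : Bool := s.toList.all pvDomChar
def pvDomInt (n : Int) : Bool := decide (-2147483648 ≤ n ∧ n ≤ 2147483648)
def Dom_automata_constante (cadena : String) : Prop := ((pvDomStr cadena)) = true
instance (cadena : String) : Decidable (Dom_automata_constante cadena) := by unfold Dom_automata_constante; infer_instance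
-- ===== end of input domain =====

-- B replaces A's explicit DFA state variable by direct structural branching (optional leading minus sign,
-- first-digit check, one validation loop over the rest); same return value, objective: simpler.
-- '.isnumeric()' is ported as PySem.Chars.isdigit — exact on the ASCII domain Dom_ states.

-- ===== PORT A =====
-- the for-loop over cadena with the state variable 'estado'; 'break' = returning -1 immediately.
-- 'int(caracter) in range(1,10)' for an ASCII digit caracter is 1 ≤ (toNat - 48) ≤ 9 (exact on Dom).
def pvALoop : Int → List Char → Int
  | e, [] => e
  | e, c :: rest =>
    if e = 0 ∧ c = '-' then pvALoop 1 rest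
    else if e = 0 ∧ PySem.Chars.isdigit c then pvALoop 2 rest
    else if e = 1 ∧ (PySem.Chars.isdigit c ∧ 1 ≤ (c.toNat : Int) - 48 ∧ (c.toNat : Int) - 48 ≤ 9) then pvALoop 2 rest
    else if e = 2 ∧ PySem.Chars.isdigit c then pvALoop 2 rest
    else -1

def automata_constante (cadena : String) : String :=
  let estado := pvALoop 0 cadena.toList
  let estados_finales : List Int := [2]
  if estado = -1 then "ESTADO TRAMPA"
  else if estado ∈ estados_finales then "ESTADO ACEPTADO"
  else "ESTADO NO ACEPTADO"

-- ===== PORT B =====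
-- all(c.isnumeric() for c in cuerpo)
def pvAllNum : List Char → Bool
  | [] => true
  | c :: rest => PySem.Chars.isdigit c && pvAllNum rest

def automata_constante_alt (cadena : String) : String :=
  match cadena.toList with
  | [] => "ESTADO NO ACEPTADO"
  | c :: resto =>
    if c = '-' then
      match resto with
      | [] => "ESTADO NO ACEPTADO"
      | d :: cuerpo =>
        if PySem.Chars.isdigit d ∧ 1 ≤ (d.toNat : Int) - 48 ∧ (d.toNat : Int) - 48 ≤ 9 then
          if pvAllNum cuerpo then "ESTADO ACEPTADO" else "ESTADO TRAMPA"
        else "ESTADO TRAMPA"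
    else if PySem.Chars.isdigit c then
      if pvAllNum resto then "ESTADO ACEPTADO" else "ESTADO TRAMPA"
    else "ESTADO TRAMPA"

-- ===== PRECONDITION & SPEC =====
def Spec_automata_constante (cadena : String) (out : String) : Prop := out = automata_constante_alt cadena
instance (cadena : String) (out : String) : Decidable (Spec_automata_constante cadena out) := by unfold Spec_automata_constante; infer_instance

-- ===== CLAIM (what is proved, stated in full; the proofs are below) =====
def Claim_equal_automata_constante : Prop := ∀ (cadena : String), Dom_automata_constante cadena → Spec_automata_constante cadena (automata_constante cadena)

-- ===== LEMMAS AND PROOFS =====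
-- once in state 2, A's loop stays there exactly while the characters are digits
lemma pvALoop_two (l : List Char) : pvALoop 2 l = if pvAllNum l then 2 else -1 := by
  induction l with
  | nil => simp [pvALoop, pvAllNum]
  | cons c rest ih =>
    by_cases h : PySem.Chars.isdigit c = true
    · simp [pvALoop, pvAllNum, h, ih]
    · simp [pvALoop, pvAllNum, h]

-- one step of A's loop from state 1 (right after the leading '-')
lemma pvALoop_one (d : Char) (cuerpo : List Char) :
    pvALoop 1 (d :: cuerpo) =
      if PySem.Chars.isdigit d = true ∧ 1 ≤ (d.toNat : Int) - 48 ∧ (d.toNat : Int) - 48 ≤ 9 then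
        pvALoop 2 cuerpo
      else -1 := by
  rw [pvALoop]
  rw [if_neg (by simp : ¬((1:Int) = 0 ∧ d = '-'))]
  rw [if_neg (by simp : ¬((1:Int) = 0 ∧ PySem.Chars.isdigit d = true))]
  by_cases h : PySem.Chars.isdigit d = true ∧ 1 ≤ (d.toNat : Int) - 48 ∧ (d.toNat : Int) - 48 ≤ 9
  · rw [if_pos ⟨rfl, h⟩, if_pos h]
  · rw [if_neg (fun hc => h hc.2),
        if_neg (by simp : ¬((1:Int) = 2 ∧ PySem.Chars.isdigit d = true)), if_neg h]

-- ===== VERDICT (by name: the statement is the Claim_ definition above) =====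
theorem automata_constante_spec : Claim_equal_automata_constante := by
  intro cadena _
  unfold Spec_automata_constante automata_constante automata_constante_alt
  cases h : cadena.toList with
  | nil => simp [pvALoop]
  | cons c resto =>
    dsimp only
    by_cases hc : c = '-'
    · subst hc
      rw [if_pos rfl]
      have hstep : pvALoop 0 ('-' :: resto) = pvALoop 1 resto := by
        rw [pvALoop, if_pos ⟨rfl, rfl⟩]
      rw [hstep]
      cases resto with
      | nil => simp [pvALoop]
      | cons d cuerpo =>
        dsimp only
        rw [pvALoop_one]
        by_cases hd : PySem.Chars.isdigit d = true ∧ 1 ≤ (d.toNat : Int) - 48 ∧ (d.toNat : Int) - 48 ≤ 9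
        · rw [if_pos hd, if_pos hd, pvALoop_two]
          cases hAll : pvAllNum cuerpo <;> simp
        · rw [if_neg hd, if_neg hd]
          simp
    · rw [if_neg hc]
      have hstep : pvALoop 0 (c :: resto) =
          if PySem.Chars.isdigit c = true then pvALoop 2 resto else -1 := by
        rw [pvALoop, if_neg (fun hcc => hc hcc.2)]
        by_cases hcd : PySem.Chars.isdigit c = true
        · rw [if_pos ⟨rfl, hcd⟩, if_pos hcd]
        · rw [if_neg (fun hp => hcd hp.2),
              if_neg (by simp [hcd] : ¬((0:Int) = 1 ∧ (PySem.Chars.isdigit c = true ∧ 1 ≤ (c.toNat : Int) - 48 ∧ (c.toNat : Int) - 48 ≤ 9))),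
              if_neg (by simp [hcd] : ¬((0:Int) = 2 ∧ PySem.Chars.isdigit c = true)), if_neg hcd]
      rw [hstep]
      by_cases hcd : PySem.Chars.isdigit c = true
      · rw [if_pos hcd, if_pos hcd, pvALoop_two]
        cases hAll : pvAllNum resto <;> simp
      · rw [if_neg hcd, if_neg hcd]
        simp
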